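-- pv_equiv track=rewrite | github.com/andreyfsch/handle_kraken_seqs | extract_subseqs.py | get_mutations_inside_window
-- ===== SOURCE A (Python) =====
-- def get_mutations_inside_window(seq_ref_mutations, window_size):
--     window_groups = {}
--     for seq_ref, mutations in seq_ref_mutations.items():
--         checked_pos = []
--         window_groups[seq_ref] = {}
--         for pos_a, mut_a in mutations.items():
--             for pos_b, mut_b in mutations.items():
--                 if pos_a == pos_b:
--                     continue
--                 if {pos_a, pos_b} in checked_pos:
--                     continue
--                 else:
--                     checked_pos.append({pos_a, pos_b})
--                 if abs(pos_a - pos_b) <= window_size: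
--                     if pos_a not in window_groups[seq_ref].keys():
--                         window_groups[seq_ref][pos_a] = {pos_a: mut_a,
--                                                          pos_b: mut_b}
--                     else:
--                         window_groups[seq_ref][pos_a][pos_b] = mut_b
--     return window_groups
-- ===== SOURCE B (Python) =====
-- def get_mutations_inside_window(seq_ref_mutations, window_size):
--     # Each unordered pair of positions is handled exactly once, at its first
--     # (earlier-outer) encounter, so iterate indexed pairs j > i directly and
--     # drop A's checked_pos list scan entirely.
--     window_groups = {}
--     for seq_ref, mutations in seq_ref_mutations.items():
--         groups = {}
--         items = list(mutations.items())
--         for i, (pos_a, mut_a) in enumerate(items):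
--             for pos_b, mut_b in items[i + 1:]:
--                 if abs(pos_a - pos_b) <= window_size:
--                     if pos_a in groups:
--                         groups[pos_a][pos_b] = mut_b
--                     else:
--                         groups[pos_a] = {pos_a: mut_a, pos_b: mut_b}
--         window_groups[seq_ref] = groups
--     return window_groups
-- ===== Notes on version B (the rewrite author's own statement) =====
-- stated objective: faster
-- what changed: B iterates only the indexed pairs j>i per sequence, eliminating A's checked_pos list of frozen pairs that is linearly scanned for every (ordered) pair.
import Mathlib
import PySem

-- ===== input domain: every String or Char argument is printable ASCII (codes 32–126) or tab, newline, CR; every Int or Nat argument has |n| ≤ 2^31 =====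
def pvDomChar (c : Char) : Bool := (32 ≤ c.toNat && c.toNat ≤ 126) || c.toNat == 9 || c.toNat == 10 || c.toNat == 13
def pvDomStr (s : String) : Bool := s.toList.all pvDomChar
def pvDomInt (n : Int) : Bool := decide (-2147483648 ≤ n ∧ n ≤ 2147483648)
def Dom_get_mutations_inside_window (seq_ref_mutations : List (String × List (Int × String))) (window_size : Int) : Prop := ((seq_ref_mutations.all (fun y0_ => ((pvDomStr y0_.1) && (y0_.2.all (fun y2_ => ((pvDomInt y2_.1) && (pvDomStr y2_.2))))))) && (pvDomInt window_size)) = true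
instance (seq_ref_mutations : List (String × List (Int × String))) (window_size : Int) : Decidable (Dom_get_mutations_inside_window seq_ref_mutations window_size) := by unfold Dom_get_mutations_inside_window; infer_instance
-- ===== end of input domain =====

-- B drops A's checked_pos list (scanned once per ordered pair) and iterates only the indexed pairs j > i; objective: faster.

-- ===== PORT A =====
-- Python `set == set` (used by `{pos_a, pos_b} in checked_pos`): same members both ways.
def pvSetEq (s t : List Int) : Bool :=
  s.all (fun x => t.contains x) && t.all (fun x => s.contains x)

-- one inner-loop step of A: state = (checked_pos, window_groups[seq_ref])
def pvStepA (w : Int) (pa : Int × String)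
    (st : List (List Int) × PySem.Dict Int (PySem.Dict Int String)) (pb : Int × String) :
    List (List Int) × PySem.Dict Int (PySem.Dict Int String) :=
  if pa.1 == pb.1 then st
  else if st.1.any (fun s => pvSetEq (PySem.Set.ofList [pa.1, pb.1]) s) then st
  else
    let checked := st.1 ++ [PySem.Set.ofList [pa.1, pb.1]]
    if ((pa.1 - pb.1).natAbs : Int) ≤ w then   -- abs(pos_a - pos_b) <= window_size
      if !(st.2.contains pa.1) then
        (checked, st.2.insert pa.1 (PySem.Dict.ofList [(pa.1, pa.2), (pb.1, pb.2)]))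
      else
        (checked, st.2.modify pa.1 PySem.Dict.empty (fun inner => inner.insert pb.1 pb.2))
    else (checked, st.2)

-- the two nested loops over mutations.items() for one seq_ref
def pvProcA (w : Int) (muts : List (Int × String)) : PySem.Dict Int (PySem.Dict Int String) :=
  (muts.foldl (fun st pa => muts.foldl (pvStepA w pa) st)
    (([] : List (List Int)), PySem.Dict.empty)).2

-- `window_groups[seq_ref] = {}` followed by in-place updates of that fresh key is threaded as
-- the per-sequence dict pvProcA inserted once (dict keys are distinct, so only this outer
-- iteration touches the key seq_ref) — exact.
def get_mutations_inside_window (seq_ref_mutations : List (String × List (Int × String))) (window_size : Int) : List (String × List (Int × List (Int × String))) :=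
  ((PySem.Dict.ofList seq_ref_mutations).items.foldl
      (fun wg p => wg.insert p.1 (pvProcA window_size (PySem.Dict.ofList p.2).items))
      PySem.Dict.empty).items.map
    (fun q => (q.1, q.2.items.map (fun r => (r.1, r.2.items))))

-- ===== PORT B =====
-- one step of B's inner loop over items[i+1:]
def pvStepB (w : Int) (pa : Int × String)
    (g : PySem.Dict Int (PySem.Dict Int String)) (pb : Int × String) :
    PySem.Dict Int (PySem.Dict Int String) :=
  if ((pa.1 - pb.1).natAbs : Int) ≤ w then
    if g.contains pa.1 then g.modify pa.1 PySem.Dict.empty (fun inner => inner.insert pb.1 pb.2)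
    else g.insert pa.1 (PySem.Dict.ofList [(pa.1, pa.2), (pb.1, pb.2)])
  else g

-- `for i, (pos_a, mut_a) in enumerate(items): for pos_b, mut_b in items[i+1:]: …`
def pvProcB (w : Int) (items : List (Int × String)) : PySem.Dict Int (PySem.Dict Int String) :=
  (PySem.List.enumerate items 0).foldl
    (fun g ip => (PySem.List.slice items (some (ip.1 + 1)) none).foldl (pvStepB w ip.2) g)
    PySem.Dict.empty

def get_mutations_inside_window_alt (seq_ref_mutations : List (String × List (Int × String))) (window_size : Int) : List (String × List (Int × List (Int × String))) :=
  (PySem.Dict.ofList seq_ref_mutations).items.map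
    (fun p => (p.1, (pvProcB window_size (PySem.Dict.ofList p.2).items).items.map
      (fun r => (r.1, r.2.items))))

-- ===== PRECONDITION & SPEC =====
def Spec_get_mutations_inside_window (seq_ref_mutations : List (String × List (Int × String))) (window_size : Int) (out : List (String × List (Int × List (Int × String)))) : Prop := out = get_mutations_inside_window_alt seq_ref_mutations window_size
instance (seq_ref_mutations : List (String × List (Int × String))) (window_size : Int) (out : List (String × List (Int × List (Int × String)))) : Decidable (Spec_get_mutations_inside_window seq_ref_mutations window_size out) := by unfold Spec_get_mutations_inside_window; infer_instance

-- ===== CLAIM (what is proved, stated in full; the proofs are below) =====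
def Claim_equal_get_mutations_inside_window : Prop := ∀ (seq_ref_mutations : List (String × List (Int × String))) (window_size : Int), Dom_get_mutations_inside_window seq_ref_mutations window_size → Spec_get_mutations_inside_window seq_ref_mutations window_size (get_mutations_inside_window seq_ref_mutations window_size)

-- ===== LEMMAS AND PROOFS =====

-- the checked_pos list after the outer loop has consumed `pre`, the rest of muts being `suf`
def pvCheckedOf : List (Int × String) → List (Int × String) → List (List Int)
  | [], _ => []
  | pa :: rest, suf =>
      ((rest ++ suf).map (fun pb => PySem.Set.ofList [pa.1, pb.1])) ++ pvCheckedOf rest suf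

-- B's loops as suffix recursion
def pvGoB (w : Int) (g : PySem.Dict Int (PySem.Dict Int String)) :
    List (Int × String) → PySem.Dict Int (PySem.Dict Int String)
  | [] => g
  | pa :: rest => pvGoB w (rest.foldl (pvStepB w pa) g) rest

theorem pvSetEq_true_iff (s t : List Int) :
    pvSetEq s t = true ↔ (∀ x ∈ s, x ∈ t) ∧ (∀ x ∈ t, x ∈ s) := by
  simp [pvSetEq]

theorem keys_ne {l1 l2 : List (Int × String)}
    (h : ((l1 ++ l2).map Prod.fst).Nodup) {x y : Int × String}
    (hx : x ∈ l1) (hy : y ∈ l2) : x.1 ≠ y.1 := by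
  rw [List.map_append, List.nodup_append] at h
  exact h.2.2 x.1 (List.mem_map_of_mem hx) y.1 (List.mem_map_of_mem hy)

theorem mem_pvCheckedOf {pb pa : Int × String} :
    ∀ {pre suf : List (Int × String)}, pb ∈ pre → pa ∈ suf →
      PySem.Set.ofList [pb.1, pa.1] ∈ pvCheckedOf pre suf
  | [], _, hb, _ => absurd hb (List.not_mem_nil)
  | x :: rest, suf, hb, ha => by
      rcases List.mem_cons.1 hb with h | h
      · subst h
        exact List.mem_append_left _ (List.mem_map_of_mem (List.mem_append_right _ ha))
      · exact List.mem_append_right _ (mem_pvCheckedOf h ha)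

theorem pvCheckedOf_shape {s : List Int} :
    ∀ {pre suf : List (Int × String)}, s ∈ pvCheckedOf pre suf →
      ∃ x y, x ∈ pre ∧ (y ∈ pre ∨ y ∈ suf) ∧ s = PySem.Set.ofList [x.1, y.1]
  | [], _, hs => absurd hs (List.not_mem_nil)
  | x :: rest, suf, hs => by
      rcases List.mem_append.1 hs with h | h
      · rcases List.mem_map.1 h with ⟨y, hy, rfl⟩
        rcases List.mem_append.1 hy with hy | hy
        · exact ⟨x, y, List.mem_cons_self, Or.inl (List.mem_cons_of_mem _ hy), rfl⟩
        · exact ⟨x, y, List.mem_cons_self, Or.inr hy, rfl⟩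
      · rcases pvCheckedOf_shape h with ⟨a, b, ha, hb, rfl⟩
        refine ⟨a, b, List.mem_cons_of_mem _ ha, ?_, rfl⟩
        rcases hb with hb | hb
        · exact Or.inl (List.mem_cons_of_mem _ hb)
        · exact Or.inr hb

theorem pvCheckedOf_append (pa : Int × String) :
    ∀ (pre suf : List (Int × String)),
      pvCheckedOf (pre ++ [pa]) suf =
        pvCheckedOf pre (pa :: suf) ++ suf.map (fun pb => PySem.Set.ofList [pa.1, pb.1])
  | [], suf => by simp [pvCheckedOf]
  | x :: pre, suf => by
      simp [List.cons_append, pvCheckedOf, pvCheckedOf_append pa pre suf,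
        List.append_assoc]

theorem foldl_id {α β : Type} (f : β → α → β) (st : β) :
    ∀ l : List α, (∀ x ∈ l, f st x = st) → l.foldl f st = st
  | [], _ => rfl
  | x :: l, h => by
      rw [List.foldl_cons, h x List.mem_cons_self]
      exact foldl_id f st l (fun y hy => h y (List.mem_cons_of_mem _ hy))

theorem pvPart3 (w : Int) (pre : List (Int × String)) (pa : Int × String)
    (suf' : List (Int × String))
    (hnd : ((pre ++ pa :: suf').map Prod.fst).Nodup) :
    ∀ (suf2 done : List (Int × String)) g, done ++ suf2 = suf' →
      suf2.foldl (pvStepA w pa)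
        (pvCheckedOf pre (pa :: suf') ++ done.map (fun pb => PySem.Set.ofList [pa.1, pb.1]), g)
      = (pvCheckedOf pre (pa :: suf') ++ suf'.map (fun pb => PySem.Set.ofList [pa.1, pb.1]),
         suf2.foldl (pvStepB w pa) g)
  | [], done, g, hds => by subst hds; simp
  | pb :: suf2', done, g, hds => by
      have hpb : pb ∈ suf' := hds ▸ List.mem_append_right _ List.mem_cons_self
      have h2 : ((pa :: suf').map Prod.fst).Nodup := by
        have h2 := hnd
        rw [List.map_append] at h2
        exact h2.of_append_right
      have hsufnd : (suf'.map Prod.fst).Nodup := by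
        rw [List.map_cons] at h2
        exact h2.of_cons
      have hpapb : pa.1 ≠ pb.1 := by
        rw [List.map_cons, List.nodup_cons] at h2
        exact fun e => h2.1 (e ▸ List.mem_map_of_mem hpb)
      -- the candidate pair {pa, pb} is not yet in checked_pos
      have hnotin : (pvCheckedOf pre (pa :: suf') ++
          done.map (fun pb => PySem.Set.ofList [pa.1, pb.1])).any
            (fun s => pvSetEq (PySem.Set.ofList [pa.1, pb.1]) s) = false := by
        rw [List.any_eq_false]
        intro s hs
        rcases List.mem_append.1 hs with hs | hs
        · rcases pvCheckedOf_shape hs with ⟨x, y, hx, _, rfl⟩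
          have hxa : x.1 ≠ pa.1 := keys_ne hnd hx List.mem_cons_self
          have hxb : x.1 ≠ pb.1 := keys_ne hnd hx (List.mem_cons_of_mem _ hpb)
          intro hEq
          have := ((pvSetEq_true_iff _ _).1 hEq).2 x.1 (by
            simp [PySem.Set.mem_ofList])
          simp only [PySem.Set.mem_ofList, List.mem_cons, List.not_mem_nil, or_false] at this
          rcases this with h | h
          · exact hxa h
          · exact hxb h
        · rcases List.mem_map.1 hs with ⟨qb, hqb, rfl⟩
          have hqdone : qb ∈ suf' := hds ▸ List.mem_append_left _ hqb
          have hqb_ne : qb.1 ≠ pb.1 := by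
            have : ((done ++ pb :: suf2').map Prod.fst).Nodup := hds ▸ hsufnd
            exact keys_ne (l1 := done) (l2 := pb :: suf2') this hqb List.mem_cons_self
          intro hEq
          have := ((pvSetEq_true_iff _ _).1 hEq).1 pb.1 (by
            simp [PySem.Set.mem_ofList])
          simp only [PySem.Set.mem_ofList, List.mem_cons, List.not_mem_nil, or_false] at this
          rcases this with h | h
          · exact hpapb h.symm
          · exact hqb_ne h.symm
      rw [List.foldl_cons]
      have hstep : pvStepA w pa
          (pvCheckedOf pre (pa :: suf') ++ done.map (fun pb => PySem.Set.ofList [pa.1, pb.1]), g) pb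
          = (pvCheckedOf pre (pa :: suf') ++
              (done ++ [pb]).map (fun pb => PySem.Set.ofList [pa.1, pb.1]),
             pvStepB w pa g pb) := by
        simp only [pvStepA, pvStepB, beq_iff_eq, hpapb, if_false, hnotin, Bool.false_eq_true,
          if_false, List.map_append, List.map_cons, List.map_nil, List.append_assoc]
        split
        · rcases hc : g.contains pa.1 with _ | _ <;> simp
        · rfl
      rw [hstep, List.foldl_cons]
      exact pvPart3 w pre pa suf' hnd suf2' (done ++ [pb]) (pvStepB w pa g pb)
        (by rw [List.append_assoc]; exact hds)

theorem pvInnerA (w : Int) (pre suf' : List (Int × String)) (pa : Int × String) (g)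
    (hnd : ((pre ++ pa :: suf').map Prod.fst).Nodup) :
    (pre ++ pa :: suf').foldl (pvStepA w pa) (pvCheckedOf pre (pa :: suf'), g)
      = (pvCheckedOf (pre ++ [pa]) suf', suf'.foldl (pvStepB w pa) g) := by
  rw [List.foldl_append]
  have h1 : pre.foldl (pvStepA w pa) (pvCheckedOf pre (pa :: suf'), g)
      = (pvCheckedOf pre (pa :: suf'), g) := by
    apply foldl_id
    intro pb hpb
    have hne : pb.1 ≠ pa.1 := keys_ne hnd hpb List.mem_cons_self
    have hin : (pvCheckedOf pre (pa :: suf')).any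
        (fun s => pvSetEq (PySem.Set.ofList [pa.1, pb.1]) s) = true := by
      rw [List.any_eq_true]
      refine ⟨PySem.Set.ofList [pb.1, pa.1],
        mem_pvCheckedOf hpb List.mem_cons_self, ?_⟩
      rw [pvSetEq_true_iff]
      constructor <;> intro x hx <;>
        simp only [PySem.Set.mem_ofList, List.mem_cons, List.not_mem_nil, or_false] at hx ⊢ <;>
        tauto
    simp [pvStepA, (Ne.symm hne), hin]
  rw [h1, List.foldl_cons]
  have h2 : pvStepA w pa (pvCheckedOf pre (pa :: suf'), g) pa
      = (pvCheckedOf pre (pa :: suf'), g) := by simp [pvStepA]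
  rw [h2]
  have := pvPart3 w pre pa suf' hnd suf' [] g rfl
  simp only [List.map_nil, List.append_nil] at this
  rw [this, pvCheckedOf_append]

theorem pvMainA (w : Int) (muts : List (Int × String))
    (hnd : (muts.map Prod.fst).Nodup) :
    ∀ (suf pre : List (Int × String)) g, pre ++ suf = muts →
      suf.foldl (fun st pa => muts.foldl (pvStepA w pa) st) (pvCheckedOf pre suf, g)
        = (pvCheckedOf muts [], pvGoB w g suf)
  | [], pre, g, h => by
      subst h
      simp [pvGoB]
  | pa :: suf', pre, g, h => by
      rw [List.foldl_cons]
      have hmut : muts = pre ++ pa :: suf' := h.symm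
      have hstep : muts.foldl (pvStepA w pa) (pvCheckedOf pre (pa :: suf'), g)
          = (pvCheckedOf (pre ++ [pa]) suf', suf'.foldl (pvStepB w pa) g) := by
        rw [hmut]; exact pvInnerA w pre suf' pa g (hmut ▸ hnd)
      rw [hstep]
      have := pvMainA w muts hnd suf' (pre ++ [pa]) (suf'.foldl (pvStepB w pa) g)
        (by rw [List.append_assoc]; exact h)
      rw [this]; rfl

theorem pvProcA_eq_goB (w : Int) (muts : List (Int × String))
    (hnd : (muts.map Prod.fst).Nodup) :
    pvProcA w muts = pvGoB w PySem.Dict.empty muts := by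
  unfold pvProcA
  have : pvCheckedOf [] muts = ([] : List (List Int)) := rfl
  rw [show (([] : List (List Int))) = pvCheckedOf [] muts from rfl,
    pvMainA w muts hnd muts [] PySem.Dict.empty rfl]

theorem pvBridgeB (w : Int) (items : List (Int × String)) :
    ∀ (suf : List (Int × String)) (n : Nat) g, items.drop n = suf →
      (PySem.List.enumerate suf (n : Int)).foldl
        (fun g ip => (PySem.List.slice items (some (ip.1 + 1)) none).foldl (pvStepB w ip.2) g) g
        = pvGoB w g suf
  | [], n, g, _ => by simp [PySem.List.enumerate, pvGoB]
  | pa :: suf', n, g, hdrop => by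
      rw [PySem.List.enumerate_cons, List.foldl_cons]
      have hslice : PySem.List.slice items (some ((n : Int) + 1)) none = suf' := by
        have : ((n : Int) + 1) = ((n + 1 : Nat) : Int) := by push_cast; ring
        rw [this, PySem.List.slice_from_natCast]
        rw [show n + 1 = n + 1 from rfl, ← List.drop_drop, hdrop, List.drop_one, List.tail_cons]
      simp only [hslice]
      have := pvBridgeB w items suf' (n + 1) (suf'.foldl (pvStepB w pa) g)
        (by rw [← List.drop_drop, hdrop, List.drop_one, List.tail_cons])
      rw [show ((n : Int) + 1) = ((n + 1 : Nat) : Int) by push_cast; ring] at *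
      exact this

theorem pvProcB_eq_goB (w : Int) (items : List (Int × String)) :
    pvProcB w items = pvGoB w PySem.Dict.empty items := by
  unfold pvProcB
  exact pvBridgeB w items items 0 PySem.Dict.empty rfl

-- ===== VERDICT (by name: the statement is the Claim_ definition above) =====
theorem get_mutations_inside_window_spec : Claim_equal_get_mutations_inside_window := by
  unfold Claim_equal_get_mutations_inside_window
  intro srm w _
  unfold Spec_get_mutations_inside_window
  unfold get_mutations_inside_window get_mutations_inside_window_alt
  have hkeys : (((PySem.Dict.ofList srm).items.map Prod.fst)).Nodup := by
    simpa [PySem.Dict.keys] using PySem.Dict.nodup_keys_ofList srm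
  rw [PySem.Dict.items_foldl_insert_fresh _ Prod.fst
    (fun p => pvProcA w (PySem.Dict.ofList p.2).items) PySem.Dict.empty
    (fun a _ => PySem.Dict.contains_empty _) hkeys]
  simp only [PySem.Dict.empty, List.nil_append, List.map_map]
  apply List.map_congr_left
  intro p _
  have hinner : (((PySem.Dict.ofList p.2).items.map Prod.fst)).Nodup := by
    simpa [PySem.Dict.keys] using PySem.Dict.nodup_keys_ofList p.2
  simp only [Function.comp]
  rw [pvProcA_eq_goB w _ hinner, ← pvProcB_eq_goB]
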